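-- pv_equiv track=rewrite | github.com/pypi-data/pypi-mirror-402 | packages/aisentry/aisentry-1.0.0.tar.gz/aisentry-1.0.0/src/aisentry/scorers/ethical_ai_scorer.py | _score_transparency_comprehensive
-- ===== SOURCE A (Python) =====
-- from typing import Any, Dict, List
--
-- def _score_transparency_comprehensive(parsed_data: Dict[str, Any]) -> int:
--     """
--     Score comprehensive transparency & disclosure - Evidence-Based
--
--     Uses AST-based detection for transparency practices.
--     Transparency helps users understand AI capabilities and limitations.
--
--     Scoring tiers:
--     - 100: Model cards + disclosure + logging
--     - 75: Model cards + disclosure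
--     - 60: Disclosure only
--     - 0: None detected
--     """
--     # Transparency is primarily about disclosure and documentation
--     function_defs = parsed_data.get('function_defs', [])
--     function_names = [f.lower() for f in function_defs]
--
--     # AI disclosure functions
--     disclosure_patterns = [
--         'ai_disclosure', 'disclose_ai', 'ai_notice', 'show_ai_notice',
--         'ai_generated_content', 'synthetic_content_warning'
--     ]
--     has_disclosure = any(
--         any(pattern in func for pattern in disclosure_patterns)
--         for func in function_names
--     )
--
--     # Model card functions (documentation)
--     model_card_patterns = [
--         'model_card', 'generate_model_card', 'model_documentation',
--         'model_metadata', 'model_info'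
--     ]
--     has_model_cards = any(
--         any(pattern in func for pattern in model_card_patterns)
--         for func in function_names
--     )
--
--     # Transparency logging functions
--     logging_patterns = [
--         'log_prediction', 'log_inference', 'audit_log', 'transparency_log',
--         'track_usage'
--     ]
--     has_logging = any(
--         any(pattern in func for pattern in logging_patterns)
--         for func in function_names
--     )
--
--     # Scoring logic
--     if has_model_cards and has_disclosure and has_logging:
--         return 100
--     elif has_model_cards and has_disclosure:
--         return 75
--     elif has_disclosure:
--         return 60
--     else:
--         return 0
-- ===== SOURCE B (Python) =====
-- from typing import Any, Dict
--
-- _DISCLOSURE_PATTERNS = [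
--     'ai_disclosure', 'disclose_ai', 'ai_notice', 'show_ai_notice',
--     'ai_generated_content', 'synthetic_content_warning'
-- ]
-- _MODEL_CARD_PATTERNS = [
--     'model_card', 'generate_model_card', 'model_documentation',
--     'model_metadata', 'model_info'
-- ]
-- _LOGGING_PATTERNS = [
--     'log_prediction', 'log_inference', 'audit_log', 'transparency_log',
--     'track_usage'
-- ]
--
-- def _score_transparency_comprehensive(parsed_data: Dict[str, Any]) -> int:
--     # Single pass over the function names, maintaining three accumulated flags,
--     # with an early break once all three are set.
--     has_disclosure = has_model_cards = has_logging = False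
--     for f in parsed_data.get('function_defs', []):
--         name = f.lower()
--         if not has_disclosure and any(p in name for p in _DISCLOSURE_PATTERNS):
--             has_disclosure = True
--         if not has_model_cards and any(p in name for p in _MODEL_CARD_PATTERNS):
--             has_model_cards = True
--         if not has_logging and any(p in name for p in _LOGGING_PATTERNS):
--             has_logging = True
--         if has_disclosure and has_model_cards and has_logging:
--             break
--     if has_model_cards and has_disclosure and has_logging:
--         return 100
--     if has_model_cards and has_disclosure:
--         return 75
--     if has_disclosure:
--         return 60
--     return 0
-- ===== Notes on version B (the rewrite author's own statement) =====
-- stated objective: alternative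
-- what changed: Replaced three independent any-of-any scans over the lowered name list with a single loop over the names that maintains three accumulated boolean flags and breaks early once all three are set.
import Mathlib
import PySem

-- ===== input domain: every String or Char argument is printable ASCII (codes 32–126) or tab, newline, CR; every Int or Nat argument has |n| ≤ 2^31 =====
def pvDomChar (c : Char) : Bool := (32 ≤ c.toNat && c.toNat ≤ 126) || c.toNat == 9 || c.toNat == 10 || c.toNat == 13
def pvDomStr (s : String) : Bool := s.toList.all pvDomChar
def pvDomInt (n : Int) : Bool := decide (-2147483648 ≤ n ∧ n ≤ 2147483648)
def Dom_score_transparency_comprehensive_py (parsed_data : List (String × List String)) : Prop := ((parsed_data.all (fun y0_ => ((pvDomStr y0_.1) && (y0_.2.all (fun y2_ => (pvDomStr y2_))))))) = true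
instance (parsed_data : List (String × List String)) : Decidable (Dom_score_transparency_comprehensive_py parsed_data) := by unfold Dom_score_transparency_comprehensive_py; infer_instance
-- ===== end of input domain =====

-- B replaces A's three independent any-of-any scans with a single loop over the
-- names maintaining three accumulated flags with an early break (objective: alternative).

-- ===== PORT A =====
def pvDisclosurePatterns : List String :=
  ["ai_disclosure", "disclose_ai", "ai_notice", "show_ai_notice",
   "ai_generated_content", "synthetic_content_warning"]

def pvModelCardPatterns : List String :=
  ["model_card", "generate_model_card", "model_documentation",
   "model_metadata", "model_info"]

def pvLoggingPatterns : List String :=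
  ["log_prediction", "log_inference", "audit_log", "transparency_log",
   "track_usage"]

def score_transparency_comprehensive_py (parsed_data : List (String × List String)) : Int :=
  let function_defs := (PySem.Dict.mk parsed_data).getD "function_defs" []
  let function_names := function_defs.map (fun f => PySem.Str.lower f)
  let has_disclosure := function_names.any (fun func =>
    pvDisclosurePatterns.any (fun pattern => PySem.Str.isIn pattern func))
  let has_model_cards := function_names.any (fun func =>
    pvModelCardPatterns.any (fun pattern => PySem.Str.isIn pattern func))
  let has_logging := function_names.any (fun func =>
    pvLoggingPatterns.any (fun pattern => PySem.Str.isIn pattern func))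
  if has_model_cards && has_disclosure && has_logging then 100
  else if has_model_cards && has_disclosure then 75
  else if has_disclosure then 60
  else 0

-- ===== PORT B =====
-- the single-pass flag loop of Source B, with the early break
def pvScanFlags : List String → Bool → Bool → Bool → Bool × Bool × Bool
  | [], hd, hm, hl => (hd, hm, hl)
  | f :: rest, hd, hm, hl =>
    let name := PySem.Str.lower f
    let hd' := if !hd && pvDisclosurePatterns.any (fun p => PySem.Str.isIn p name) then true else hd
    let hm' := if !hm && pvModelCardPatterns.any (fun p => PySem.Str.isIn p name) then true else hm
    let hl' := if !hl && pvLoggingPatterns.any (fun p => PySem.Str.isIn p name) then true else hl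
    if hd' && hm' && hl' then (hd', hm', hl')
    else pvScanFlags rest hd' hm' hl'

def score_transparency_comprehensive_py_alt (parsed_data : List (String × List String)) : Int :=
  let (hd, hm, hl) := pvScanFlags ((PySem.Dict.mk parsed_data).getD "function_defs" []) false false false
  if hm && hd && hl then 100
  else if hm && hd then 75
  else if hd then 60
  else 0

-- ===== PRECONDITION & SPEC =====
def Spec_score_transparency_comprehensive_py (parsed_data : List (String × List String)) (out : Int) : Prop := out = score_transparency_comprehensive_py_alt parsed_data
instance (parsed_data : List (String × List String)) (out : Int) : Decidable (Spec_score_transparency_comprehensive_py parsed_data out) := by unfold Spec_score_transparency_comprehensive_py; infer_instance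

-- ===== CLAIM (what is proved, stated in full; the proofs are below) =====
def Claim_equal_score_transparency_comprehensive_py : Prop := ∀ (parsed_data : List (String × List String)), Dom_score_transparency_comprehensive_py parsed_data → Spec_score_transparency_comprehensive_py parsed_data (score_transparency_comprehensive_py parsed_data)

-- ===== LEMMAS AND PROOFS =====

theorem pvScanFlags_eq (l : List String) (hd hm hl : Bool) :
    pvScanFlags l hd hm hl =
      (hd || l.any (fun f => pvDisclosurePatterns.any (fun p => PySem.Str.isIn p (PySem.Str.lower f))),
       hm || l.any (fun f => pvModelCardPatterns.any (fun p => PySem.Str.isIn p (PySem.Str.lower f))),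
       hl || l.any (fun f => pvLoggingPatterns.any (fun p => PySem.Str.isIn p (PySem.Str.lower f)))) := by
  induction l generalizing hd hm hl with
  | nil => simp [pvScanFlags]
  | cons f rest ih =>
    simp only [pvScanFlags, List.any_cons]
    have step : ∀ (b c : Bool), (if !b && c then true else b) = (b || c) := by decide
    rw [step hd, step hm, step hl]
    split
    · rename_i h
      simp only [Bool.and_eq_true] at h
      obtain ⟨⟨h1, h2⟩, h3⟩ := h
      simp only [← Bool.or_assoc]
      rw [h1, h2, h3]
      simp
    · rw [ih]
      simp [Bool.or_assoc]

-- ===== VERDICT (by name: the statement is the Claim_ definition above) =====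
theorem score_transparency_comprehensive_py_spec : Claim_equal_score_transparency_comprehensive_py := by
  intro parsed_data _
  unfold Spec_score_transparency_comprehensive_py
  unfold score_transparency_comprehensive_py score_transparency_comprehensive_py_alt
  rw [pvScanFlags_eq]
  simp [List.any_map, Function.comp]
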